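-- pv_equiv track=rewrite | github.com/johndun/llmpipe | src/llmpipe/modules/document_chunker.py | _split_document_into_sections
-- ===== SOURCE A (Python) =====
-- def _split_document_into_sections(document: str, breaks: list[str]) -> list[str]:
--     """
--     Split a document into sections based on a list of breaking points.
--     Each section starts with one of the lines specified in breaks.
--
--     Args:
--         document: A string containing the full text document
--         breaks: A list of strings, each being a complete line that should start a new section
--
--     Returns:
--         A list of strings, each containing a section of the document
--     """
--     # Convert document to list of lines and remove empty lines at start/end
--     lines = document.splitlines()
--
--     # Find indices where each break occurs
--     break_indices = []
--     for i, line in enumerate(lines):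
--         if line in breaks:
--             break_indices.append(i)
--
--     # If no breaks are found, return the entire document as one section
--     if not break_indices:
--         return [document]
--
--     # Create sections using break points
--     sections = []
--     for i in range(len(break_indices)):
--         start = break_indices[i]
--         # If this is the last break, go to end of document
--         if i == len(break_indices) - 1:
--             end = len(lines)
--         else:
--             end = break_indices[i + 1]
--
--         # Join lines for this section and add to results
--         section = '\n'.join(lines[start:end])
--         sections.append(section)
--
--     return sections
-- ===== SOURCE B (Python) =====
-- def _split_document_into_sections(document: str, breaks: list[str]) -> list[str]:
--     """Single streaming pass: flush the running section whenever a break line is seen."""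
--     sections = []
--     current = None
--     for line in document.splitlines():
--         if line in breaks:
--             if current is not None:
--                 sections.append('\n'.join(current))
--             current = [line]
--         elif current is not None:
--             current.append(line)
--     if current is not None:
--         sections.append('\n'.join(current))
--     if not sections:
--         return [document]
--     return sections
-- ===== Notes on version B (the rewrite author's own statement) =====
-- stated objective: alternative
-- what changed: Replaced the two-phase collect-break-indices-then-slice-between-pairs algorithm with a single streaming pass that maintains a current-section buffer and flushes it at each break line.
import Mathlib
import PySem

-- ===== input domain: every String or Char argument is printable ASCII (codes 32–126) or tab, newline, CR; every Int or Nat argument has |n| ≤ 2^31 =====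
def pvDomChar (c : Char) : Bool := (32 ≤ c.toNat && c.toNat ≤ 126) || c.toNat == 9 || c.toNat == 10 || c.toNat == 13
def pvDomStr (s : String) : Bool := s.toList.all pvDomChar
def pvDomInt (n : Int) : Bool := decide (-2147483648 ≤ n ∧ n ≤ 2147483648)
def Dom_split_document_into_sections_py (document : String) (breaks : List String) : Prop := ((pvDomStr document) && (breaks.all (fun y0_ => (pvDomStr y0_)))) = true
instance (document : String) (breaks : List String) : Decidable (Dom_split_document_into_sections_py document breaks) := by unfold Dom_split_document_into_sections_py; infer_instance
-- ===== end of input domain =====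

-- B is a single streaming pass with a current-section buffer instead of A's collect-indices-then-slice; same return value, no speed claim.

-- ===== PORT A =====
def split_document_into_sections_py (document : String) (breaks : List String) : List String :=
  let lines := PySem.Str.splitlines document
  let break_indices : List Int := (PySem.List.enumerate lines).foldl
    (fun acc p => if breaks.contains p.2 then acc ++ [p.1] else acc) []
  if break_indices = [] then [document]
  else
    (PySem.List.pyRange 0 (PySem.List.len break_indices) 1).foldl
      (fun sections i =>
        let start := PySem.List.pyGetD break_indices i 0
        let e : Int := if i = PySem.List.len break_indices - 1
                       then PySem.List.len lines
                       else PySem.List.pyGetD break_indices (i + 1) 0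
        sections ++ [PySem.Str.join "\n" (PySem.List.slice lines (some start) (some e))]) []

-- ===== PORT B =====
def split_document_into_sections_py_alt (document : String) (breaks : List String) : List String :=
  let lines := PySem.Str.splitlines document
  let st : List String × Option (List String) := lines.foldl
    (fun st line =>
      if breaks.contains line then
        (match st.2 with
         | some cur => st.1 ++ [PySem.Str.join "\n" cur]
         | none => st.1, some [line])
      else
        match st.2 with
        | some cur => (st.1, some (cur ++ [line]))
        | none => st) ([], none)
  let sections := match st.2 with
    | some cur => st.1 ++ [PySem.Str.join "\n" cur]
    | none => st.1
  if sections = [] then [document] else sections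

-- ===== PRECONDITION & SPEC =====
def Spec_split_document_into_sections_py (document : String) (breaks : List String) (out : List String) : Prop := out = split_document_into_sections_py_alt document breaks
instance (document : String) (breaks : List String) (out : List String) : Decidable (Spec_split_document_into_sections_py document breaks out) := by unfold Spec_split_document_into_sections_py; infer_instance

-- ===== CLAIM (what is proved, stated in full; the proofs are below) =====
def Claim_equal_split_document_into_sections_py : Prop := ∀ (document : String) (breaks : List String), Dom_split_document_into_sections_py document breaks → Spec_split_document_into_sections_py document breaks (split_document_into_sections_py document breaks)

-- ===== LEMMAS AND PROOFS =====

def pvBi (breaks ls : List String) : List Int :=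
  ((PySem.List.enumerate ls).filter (fun p => breaks.contains p.2)).map (·.1)

lemma pvBi_mem (breaks ls : List String) {v : Int} (hv : v ∈ pvBi breaks ls) :
    ∃ k : Nat, k < ls.length ∧ v = (k : Int) := by
  obtain ⟨q, hq, rfl⟩ := List.mem_map.1 hv
  have hq' := List.mem_of_mem_filter hq
  rw [PySem.List.mem_enumerate_iff] at hq'
  obtain ⟨k, hk, rfl⟩ := hq'
  exact ⟨k, hk, by simp⟩

lemma pvBi_append (breaks ls : List String) (x : String) :
    pvBi breaks (ls ++ [x]) =
      pvBi breaks ls ++ (if breaks.contains x then [(ls.length : Int)] else []) := by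
  unfold pvBi
  rw [PySem.List.enumerate_append, PySem.List.enumerate_cons, PySem.List.enumerate_nil]
  rw [List.filter_append, List.map_append]
  by_cases hx : x ∈ breaks <;> simp [hx]

lemma pvZipTail {α : Type} (v : List α) (a : α) (hv : v ≠ []) :
    v.zip (v.tail ++ [a]) = v.zip v.tail ++ [(v.getLast hv, a)] := by
  induction v with
  | nil => exact absurd rfl hv
  | cons x t ih =>
    cases t with
    | nil => simp
    | cons y u =>
      have h := ih (by simp)
      simp only [List.tail_cons] at h
      simp only [List.tail_cons, List.cons_append, List.zip_cons_cons, h]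
      simp [List.getLast_cons]

lemma pvZipSnocTail {α : Type} (v : List α) (a : α) (hv : v ≠ []) :
    (v ++ [a]).zip (v.tail ++ [a]) = v.zip v.tail ++ [(v.getLast hv, a)] := by
  induction v with
  | nil => exact absurd rfl hv
  | cons x t ih =>
    cases t with
    | nil => simp
    | cons y u =>
      have h := ih (by simp)
      simp only [List.tail_cons, List.cons_append] at h
      simp only [List.cons_append, List.tail_cons, List.zip_cons_cons, h]
      simp [List.getLast_cons]

def pvSeg (ls : List String) (p : Int × Int) : String :=
  PySem.Str.join "\n" (PySem.List.slice ls (some p.1) (some p.2))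

lemma pvSeg_append (ls : List String) (x : String) (p q : Int)
    (hp : 0 ≤ p) (hq : 0 ≤ q) (hpl : p.toNat ≤ ls.length) (hql : q.toNat ≤ ls.length) :
    pvSeg (ls ++ [x]) (p, q) = pvSeg ls (p, q) := by
  unfold pvSeg
  rw [PySem.List.slice_toNat _ hp hq, PySem.List.slice_toNat _ hp hq]
  rw [List.drop_append_of_le_length hpl]
  rw [List.take_append_of_le_length (by simp [List.length_drop]; omega)]

lemma pvSeg_last (ls : List String) (x : String) (j : Int)
    (hj : 0 ≤ j) (hjl : j.toNat ≤ ls.length) :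
    pvSeg (ls ++ [x]) (j, (ls.length : Int)) = PySem.Str.join "\n" (ls.drop j.toNat) := by
  unfold pvSeg
  rw [PySem.List.slice_toNat _ hj (by positivity)]
  rw [List.drop_append_of_le_length hjl]
  rw [List.take_append_of_le_length (by simp only [List.length_drop]; omega)]
  congr 1
  simp [List.take_of_length_le, List.length_drop]

lemma pvA_sections (breaks ls : List String) :
    (PySem.List.pyRange 0 (PySem.List.len (pvBi breaks ls)) 1).foldl
      (fun sections i =>
        sections ++ [PySem.Str.join "\n" (PySem.List.slice ls
          (some (PySem.List.pyGetD (pvBi breaks ls) i 0))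
          (some (if i = PySem.List.len (pvBi breaks ls) - 1
                 then PySem.List.len ls
                 else PySem.List.pyGetD (pvBi breaks ls) (i + 1) 0)))]) []
    = ((pvBi breaks ls).zip ((pvBi breaks ls).tail ++ [(ls.length : Int)])).map (pvSeg ls) := by
  simp only [PySem.List.len_eq]
  rw [PySem.List.pyRange_zero_natCast]
  rw [PySem.List.foldl_append_singleton_eq_map
    (f := fun i => PySem.Str.join "\n" (PySem.List.slice ls (some (PySem.List.pyGetD (pvBi breaks ls) i 0))
      (some (if i = ((pvBi breaks ls).length : Int) - 1 then (ls.length : Int) else PySem.List.pyGetD (pvBi breaks ls) (i + 1) 0))))]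
  rw [List.map_map, List.nil_append]
  apply List.ext_getElem
  · simp only [List.length_map, List.length_range, List.length_zip, List.length_append,
      List.length_tail, List.length_cons, List.length_nil]
    omega
  · intro k hk1 hk2
    simp only [List.length_map, List.length_range] at hk1
    simp only [List.getElem_map, List.getElem_range, Function.comp_apply, List.getElem_zip]
    by_cases hlast : k = (pvBi breaks ls).length - 1
    · rw [if_pos (by omega)]
      have htl : ((pvBi breaks ls).tail ++ [(ls.length : Int)])[k]'(by simp [List.length_tail]; omega) = (ls.length : Int) := by
        rw [List.getElem_append_right (by simp only [List.length_tail]; omega)]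
        simp only [List.length_tail]
        simp
      rw [htl]
      unfold pvSeg
      simp only [PySem.List.pyGetD_natCast]
      rw [List.getD_eq_getElem _ _ hk1]
    · rw [if_neg (by omega)]
      have hk3 : k < (pvBi breaks ls).length - 1 := by omega
      have htl : ((pvBi breaks ls).tail ++ [(ls.length : Int)])[k]'(by simp [List.length_tail]; omega) = (pvBi breaks ls)[k+1]'(by omega) := by
        rw [List.getElem_append_left (by simp only [List.length_tail]; omega)]
        simp [List.getElem_tail]
      rw [htl]
      unfold pvSeg
      have hc : ((k : Int) + 1) = ((k + 1 : Nat) : Int) := by push_cast; ring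
      rw [hc]
      simp only [PySem.List.pyGetD_natCast]
      rw [List.getD_eq_getElem _ _ hk1, List.getD_eq_getElem _ _ (by omega)]

def pvStep (breaks : List String) (st : List String × Option (List String)) (line : String) :
    List String × Option (List String) :=
  if breaks.contains line then
    (match st.2 with
     | some cur => st.1 ++ [PySem.Str.join "\n" cur]
     | none => st.1, some [line])
  else
    match st.2 with
    | some cur => (st.1, some (cur ++ [line]))
    | none => st

lemma pvLoop_spec (breaks ls : List String) :
    ls.foldl (pvStep breaks) ([], none) =
      match (pvBi breaks ls).getLast? with
      | none => ([], none)
      | some j => (((pvBi breaks ls).zip (pvBi breaks ls).tail).map (pvSeg ls),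
                   some (ls.drop j.toNat)) := by
  induction ls using List.reverseRecOn with
  | nil =>
    simp [pvBi, PySem.List.enumerate_nil]
  | append_singleton ls x ih =>
    rw [List.foldl_append, List.foldl_cons, List.foldl_nil, ih]
    have hmem : ∀ v ∈ pvBi breaks ls, ∃ k : Nat, k < ls.length ∧ v = (k : Int) :=
      fun v hv => pvBi_mem breaks ls hv
    by_cases hx : x ∈ breaks
    · -- x is a break: bi' = bi ++ [len ls]
      have hbi' : pvBi breaks (ls ++ [x]) = pvBi breaks ls ++ [(ls.length : Int)] := by
        rw [pvBi_append]; simp [hx]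
      cases h : (pvBi breaks ls).getLast? with
      | none =>
        have hnil : pvBi breaks ls = [] := List.getLast?_eq_none_iff.mp h
        simp only [pvStep, hx, List.contains_eq_mem, decide_true, if_pos]
        rw [hbi', hnil]
        simp [List.drop_left']
      | some j =>
        have hne : pvBi breaks ls ≠ [] := by
          intro hc; rw [hc] at h; simp at h
        have hjl : (pvBi breaks ls).getLast hne = j := by
          rw [List.getLast?_eq_some_getLast hne] at h; exact Option.some.inj h
        obtain ⟨kj, hkj, hjk⟩ := hmem j (hjl ▸ List.getLast_mem hne)
        simp only [pvStep, hx, List.contains_eq_mem, decide_true, if_pos]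
        rw [hbi']
        have hlast' : (pvBi breaks ls ++ [(ls.length : Int)]).getLast? = some (ls.length : Int) :=
          List.getLast?_concat
        rw [hlast']
        simp only [Prod.mk.injEq]
        constructor
        · -- sections component
          have htail : (pvBi breaks ls ++ [(ls.length : Int)]).tail
              = (pvBi breaks ls).tail ++ [(ls.length : Int)] := by
            rcases List.exists_cons_of_ne_nil hne with ⟨c, t, hct⟩
            rw [hct]; simp
          rw [htail, pvZipSnocTail _ _ hne, List.map_append, List.map_singleton, hjl]
          congr 1
          · apply List.map_congr_left
            intro p hp
            obtain ⟨hp1, hp2⟩ := List.of_mem_zip hp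
            obtain ⟨k1, hk1, he1⟩ := hmem p.1 hp1
            obtain ⟨k2, hk2, he2⟩ := hmem p.2 (List.mem_of_mem_tail hp2)
            obtain ⟨a, b⟩ := p
            exact (pvSeg_append ls x a b (by omega) (by omega) (by omega) (by omega)).symm
          · rw [pvSeg_last ls x j (by omega) (by omega)]
        · -- current component
          rw [show ((ls.length : Int)).toNat = ls.length by omega]
          simp [List.drop_left']
    · -- x is not a break: bi' = bi
      have hbi' : pvBi breaks (ls ++ [x]) = pvBi breaks ls := by
        rw [pvBi_append]; simp [hx]
      rw [hbi']
      cases h : (pvBi breaks ls).getLast? with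
      | none =>
        simp [pvStep, hx]
      | some j =>
        have hne : pvBi breaks ls ≠ [] := by
          intro hc; rw [hc] at h; simp at h
        obtain ⟨kj, hkj, hjk⟩ := hmem j (by
          have h2 := List.getLast?_eq_some_getLast hne
          rw [h2] at h
          exact Option.some.inj h ▸ List.getLast_mem hne)
        simp only [pvStep, hx, List.contains_eq_mem, decide_false, Bool.false_eq_true, if_neg,
          not_false_eq_true]
        simp only [Prod.mk.injEq]
        constructor
        · apply List.map_congr_left
          intro p hp
          obtain ⟨hp1, hp2⟩ := List.of_mem_zip hp
          obtain ⟨k1, hk1, he1⟩ := hmem p.1 hp1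
          obtain ⟨k2, hk2, he2⟩ := hmem p.2 (List.mem_of_mem_tail hp2)
          obtain ⟨a, b⟩ := p
          exact (pvSeg_append ls x a b (by omega) (by omega) (by omega) (by omega)).symm
        · rw [List.drop_append_of_le_length (by omega)]

lemma pvSeg_full (ls : List String) (j : Int) (hj : 0 ≤ j) :
    pvSeg ls (j, (ls.length : Int)) = PySem.Str.join "\n" (ls.drop j.toNat) := by
  unfold pvSeg
  rw [PySem.List.slice_toNat _ hj (by positivity)]
  congr 1
  simp [List.take_of_length_le, List.length_drop]

-- ===== VERDICT (by name: the statement is the Claim_ definition above) =====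
theorem split_document_into_sections_py_spec : Claim_equal_split_document_into_sections_py := by
  intro document breaks _
  unfold Spec_split_document_into_sections_py
  simp only [split_document_into_sections_py, split_document_into_sections_py_alt]
  rw [show (fun (st : List String × Option (List String)) (line : String) =>
      if breaks.contains line then
        (match st.2 with
         | some cur => st.1 ++ [PySem.Str.join "\n" cur]
         | none => st.1, some [line])
      else
        match st.2 with
        | some cur => (st.1, some (cur ++ [line]))
        | none => st) = pvStep breaks from rfl]
  rw [PySem.List.foldl_append_if (p := fun p : Int × String => breaks.contains p.2)
    (f := fun p : Int × String => p.1)]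
  rw [List.nil_append]
  rw [show ((PySem.List.enumerate (PySem.Str.splitlines document)).filter
      (fun p => breaks.contains p.2)).map (fun p => p.1)
      = pvBi breaks (PySem.Str.splitlines document) from rfl]
  rw [pvLoop_spec]
  cases h : (pvBi breaks (PySem.Str.splitlines document)).getLast? with
  | none =>
    have hnil : pvBi breaks (PySem.Str.splitlines document) = [] :=
      List.getLast?_eq_none_iff.mp h
    rw [hnil]
    simp
  | some j =>
    have hne : pvBi breaks (PySem.Str.splitlines document) ≠ [] := by
      intro hc; rw [hc] at h; simp at h
    have hjl : (pvBi breaks (PySem.Str.splitlines document)).getLast hne = j := by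
      rw [List.getLast?_eq_some_getLast hne] at h; exact Option.some.inj h
    obtain ⟨kj, hkj, hjk⟩ := pvBi_mem breaks _ (hjl ▸ List.getLast_mem hne)
    rw [if_neg hne]
    rw [pvA_sections]
    rw [pvZipTail _ ((PySem.Str.splitlines document).length : Int) hne]
    rw [List.map_append, List.map_singleton, hjl]
    rw [pvSeg_full _ j (by omega)]
    simp
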